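-- pv_equiv track=rewrite | github.com/DancingOnAir/LeetcodePythonSolution | hash_table/3767_maximize_points_after_choosing_k_tasks.py | maxPoints1
-- ===== SOURCE A (Python) =====
-- from typing import List
--
-- def maxPoints1(technique1: List[int], technique2: List[int], k: int) -> int:
--     n = len(technique1)
--     diffs = []
--     for i in range(n):
--         diffs.append((technique1[i] - technique2[i], technique2[i]))
--     diffs.sort()
--
--     res = 0
--     while k > 0:
--         res += sum(diffs.pop())
--         k -= 1
--
--     while diffs:
--         cur = diffs.pop()
--         if cur[0] < 0:
--             res += cur[1]
--         else:
--             res += cur[0] + cur[1]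
--     return res
-- ===== SOURCE B (Python) =====
-- from typing import List
--
-- def maxPoints1(technique1: List[int], technique2: List[int], k: int) -> int:
--     # Every task contributes max(t1, t2); forcing a task into the chosen k costs
--     # the penalty min(t1 - t2, 0).  Quickselect (recursive 3-way partition with a
--     # middle-element pivot) sums the k largest penalties in average O(n) -- no sort.
--     base = sum(a if a >= b else b for a, b in zip(technique1, technique2))
--     pens = [a - b if a < b else 0 for a, b in zip(technique1, technique2)]
--     return base + _topk_sum(pens, k)
--
-- def _topk_sum(xs, k):
--     # sum of the k largest values of xs (0 <= k <= len(xs); k <= 0 -> 0)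
--     if k <= 0:
--         return 0
--     pivot = xs[len(xs) // 2]
--     hi = [x for x in xs if x > pivot]
--     if k <= len(hi):
--         return _topk_sum(hi, k)
--     eq = [x for x in xs if x == pivot]
--     if k <= len(hi) + len(eq):
--         return sum(hi) + (k - len(hi)) * pivot
--     lo = [x for x in xs if x < pivot]
--     return sum(hi) + sum(eq) + _topk_sum(lo, k - len(hi) - len(eq))
-- ===== Notes on version B (the rewrite author's own statement) =====
-- stated objective: faster
-- what changed: A sorts all (diff,t2) pairs and drains them with two pop loops; B never sorts: it sums max(t1,t2) in one pass and uses a recursive quickselect (3-way partition around a middle pivot) to add the k largest penalties min(t1-t2,0).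
import Mathlib
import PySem

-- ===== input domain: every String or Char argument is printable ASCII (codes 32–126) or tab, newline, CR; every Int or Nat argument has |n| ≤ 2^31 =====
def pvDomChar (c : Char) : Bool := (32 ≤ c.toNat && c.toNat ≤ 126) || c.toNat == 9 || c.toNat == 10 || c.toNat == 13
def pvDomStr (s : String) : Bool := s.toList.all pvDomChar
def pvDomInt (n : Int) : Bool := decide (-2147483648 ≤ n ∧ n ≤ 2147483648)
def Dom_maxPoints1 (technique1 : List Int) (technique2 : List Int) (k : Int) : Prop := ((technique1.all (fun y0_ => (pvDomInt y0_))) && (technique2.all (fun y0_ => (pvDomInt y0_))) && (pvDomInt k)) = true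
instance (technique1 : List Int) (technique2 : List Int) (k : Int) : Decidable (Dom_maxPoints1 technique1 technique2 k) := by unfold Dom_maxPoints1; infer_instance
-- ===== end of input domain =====

-- B replaces A's sort of (diff, t2) pairs and its two pop loops by one pass summing
-- max(t1,t2) and a recursive quickselect (3-way partition, middle pivot, no sort)
-- that sums the k largest penalties min(t1-t2,0) (objective: faster on average).
-- A pops from its local list only; the return value is what is proved.

-- ===== PORT A =====
-- 'while k > 0: res += sum(diffs.pop()); k -= 1'  (fuel = number of remaining iterations)
def aPopK : Nat → List (Int × Int) → Int → Int × List (Int × Int)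
  | 0, ds, res => (res, ds)
  | n + 1, ds, res =>
    match PySem.List.pop? ds (-1) with
    | none => (res, ds)        -- Python raises IndexError here; Pre_ excludes it
    | some (cur, rest) => aPopK n rest (res + (cur.1 + cur.2))

-- 'while diffs: cur = diffs.pop(); …'
def aDrain (ds : List (Int × Int)) (res : Int) : Int :=
  match h : PySem.List.pop? ds (-1) with
  | none => res
  | some (cur, rest) =>
    aDrain rest (if cur.1 < 0 then res + cur.2 else res + (cur.1 + cur.2))
termination_by ds.length
decreasing_by
  have := PySem.List.length_of_pop?_eq_some ds h
  simp at this
  omega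

def maxPoints1 (technique1 : List Int) (technique2 : List Int) (k : Int) : Int :=
  let n : Int := technique1.length
  let diffs : List (Int × Int) :=
    (PySem.List.pyRange 0 n 1).foldl
      (fun acc i =>
        acc ++ [(PySem.List.pyGetD technique1 i 0 - PySem.List.pyGetD technique2 i 0,
                 PySem.List.pyGetD technique2 i 0)]) []
  let diffs := PySem.List.sorted2 diffs (fun p => p.1) (fun p => p.2)
  let st := aPopK k.toNat diffs 0
  aDrain st.2 st.1

-- ===== PORT B =====
-- '_topk_sum(xs, k)': quickselect-style recursion, 3-way partition around xs[len//2]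
def topkSum (xs : List Int) (k : Int) : Int :=
  if k ≤ 0 then 0
  else
    match hp : PySem.List.pyGet? xs (PySem.Int.floordiv (xs.length : Int) 2) with
    | none => 0     -- Python raises IndexError here (xs empty); unreachable under Pre_
    | some pivot =>
      let hi := xs.filter (fun x => pivot < x)
      if k ≤ (hi.length : Int) then topkSum hi k
      else
        let eq := xs.filter (fun x => x = pivot)
        if k ≤ (hi.length : Int) + (eq.length : Int) then
          hi.sum + (k - (hi.length : Int)) * pivot
        else
          let lo := xs.filter (fun x => x < pivot)
          hi.sum + eq.sum + topkSum lo (k - (hi.length : Int) - (eq.length : Int))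
termination_by xs.length
decreasing_by
  all_goals
    have hmem := PySem.List.mem_of_pyGet?_eq_some _ hp
    simp only [List.length_unattach]
    rw [← List.length_attach (l := xs), List.length_filter_lt_length_iff_exists]
    exact ⟨⟨pivot, hmem⟩, List.mem_attach xs ⟨pivot, hmem⟩, by simp⟩

def maxPoints1_alt (technique1 : List Int) (technique2 : List Int) (k : Int) : Int :=
  let base := ((technique1.zip technique2).map
    (fun ab => if ab.1 ≥ ab.2 then ab.1 else ab.2)).sum
  let pens := (technique1.zip technique2).map
    (fun ab => if ab.1 < ab.2 then ab.1 - ab.2 else 0)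
  base + topkSum pens k

-- ===== PRECONDITION & SPEC =====
-- A raises IndexError when technique2 is shorter than technique1 (t2[i]) or when
-- k exceeds len(technique1) (pop from an exhausted list); exactly those are excluded.
def Pre_maxPoints1 (technique1 : List Int) (technique2 : List Int) (k : Int) : Prop :=
  technique1.length ≤ technique2.length ∧ k ≤ (technique1.length : Int)
instance (technique1 : List Int) (technique2 : List Int) (k : Int) : Decidable (Pre_maxPoints1 technique1 technique2 k) := by unfold Pre_maxPoints1; infer_instance

def pvWitness_maxPoints1 : List Int × List Int × Int := ([1, 2], [2, 1], 1)

def Spec_maxPoints1 (technique1 : List Int) (technique2 : List Int) (k : Int) (out : Int) : Prop := out = maxPoints1_alt technique1 technique2 k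
instance (technique1 : List Int) (technique2 : List Int) (k : Int) (out : Int) : Decidable (Spec_maxPoints1 technique1 technique2 k out) := by unfold Spec_maxPoints1; infer_instance

-- ===== CLAIM (what is proved, stated in full; the proofs are below) =====
def Claim_equal_maxPoints1 : Prop := ∀ (technique1 : List Int) (technique2 : List Int) (k : Int), Dom_maxPoints1 technique1 technique2 k → Pre_maxPoints1 technique1 technique2 k → Spec_maxPoints1 technique1 technique2 k (maxPoints1 technique1 technique2 k)

-- ===== LEMMAS AND PROOFS =====

-- abbreviations used only by the proofs
def pvG (p : Int × Int) : Int × Int := (p.1 - p.2, p.2)          -- A's pair for a task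
def pvM (q : Int × Int) : Int := if q.1 < 0 then q.2 else q.1 + q.2   -- A's 'rest' contribution = max(t1,t2)
def pvC (q : Int × Int) : Int := if q.1 < 0 then q.1 else 0           -- chosen-task penalty = min(diff,0)
def pvMx (p : Int × Int) : Int := if p.1 ≥ p.2 then p.1 else p.2      -- B's base term
def pvMn (p : Int × Int) : Int := if p.1 < p.2 then p.1 - p.2 else 0  -- B's penalty term

-- A's building loop produces exactly the zip pairs mapped through pvG
lemma build_eq (t1 t2 : List Int) (h : t1.length ≤ t2.length) :
    (PySem.List.pyRange 0 (t1.length : Int) 1).map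
      (fun i => (PySem.List.pyGetD t1 i 0 - PySem.List.pyGetD t2 i 0,
                 PySem.List.pyGetD t2 i 0))
      = (t1.zip t2).map pvG := by
  rw [PySem.List.pyRange_one]
  rw [List.map_map]
  apply List.ext_getElem
  · simp; omega
  · intro i h1 h2
    simp only [List.getElem_map, List.getElem_range, Function.comp_apply, zero_add,
      PySem.List.pyGetD_natCast, List.getElem_zip, pvG]
    have hi1 : i < t1.length := by simpa using h1
    have hi2 : i < t2.length := by omega
    rw [List.getD_eq_getElem t1 0 hi1, List.getD_eq_getElem t2 0 hi2]

lemma aPopK_spec (n : Nat) :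
    ∀ (ds : List (Int × Int)) (res : Int), n ≤ ds.length →
      aPopK n ds res = (res + ((ds.reverse.take n).map (fun p => p.1 + p.2)).sum,
                        (ds.reverse.drop n).reverse) := by
  induction n with
  | zero => intro ds res _; simp [aPopK]
  | succ n ih =>
    intro ds res h
    rcases List.eq_nil_or_concat ds with rfl | ⟨ys, x, rfl⟩
    · simp at h
    · simp only [List.concat_eq_append] at *
      rw [show aPopK (n + 1) (ys ++ [x]) res = aPopK n ys (res + (x.1 + x.2)) by
        simp [aPopK, PySem.List.pop?_last]]
      have hy : n ≤ ys.length := by simp at h; omega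
      rw [ih ys _ hy]
      simp [List.take_succ_cons, List.drop_succ_cons]
      ring

lemma aDrain_nil (res : Int) : aDrain [] res = res := by
  rw [aDrain]
  rfl

lemma aDrain_concat (ys : List (Int × Int)) (x : Int × Int) (res : Int) :
    aDrain (ys ++ [x]) res
      = aDrain ys (if x.1 < 0 then res + x.2 else res + (x.1 + x.2)) := by
  rw [aDrain]
  split
  · next h => rw [PySem.List.pop?_last] at h; cases h
  · next cur rest h =>
    rw [PySem.List.pop?_last] at h
    cases h
    rfl

lemma aDrain_spec (ds : List (Int × Int)) : ∀ (res : Int),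
    aDrain ds res = res + (ds.map pvM).sum := by
  induction ds using List.reverseRecOn with
  | nil => intro res; simp [aDrain_nil]
  | append_singleton ys x ih =>
    intro res
    rw [aDrain_concat, ih]
    simp [pvM]
    split_ifs <;> ring

-- insertion keeps a compatible transitive order invariant
lemma pairwise_insertBy {α : Type} (before : α → α → Bool) (Q : α → α → Prop)
    (htrans : ∀ a b c, Q a b → Q b c → Q a c)
    (h1 : ∀ a b, before a b = true → Q a b)
    (h2 : ∀ a b, before a b = false → Q b a)
    (x : α) : ∀ (ys : List α), ys.Pairwise Q →
      (PySem.List.insertBy before x ys).Pairwise Q := by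
  intro ys
  induction ys with
  | nil => intro _; simp [PySem.List.insertBy]
  | cons y ys ih =>
    intro hp
    rw [List.pairwise_cons] at hp
    by_cases hb : before x y = true
    · show (if before x y = true then x :: y :: ys else _).Pairwise Q
      rw [if_pos hb]
      refine List.Pairwise.cons ?_ (List.Pairwise.cons hp.1 hp.2)
      intro z hz
      rcases List.mem_cons.mp hz with rfl | hz
      · exact h1 _ _ hb
      · exact htrans _ _ _ (h1 _ _ hb) (hp.1 z hz)
    · show (if before x y = true then x :: y :: ys else y :: PySem.List.insertBy before x ys).Pairwise Q
      rw [if_neg hb]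
      refine List.Pairwise.cons ?_ (ih hp.2)
      intro z hz
      have hmem := (PySem.List.mem_insertBy before x z ys).mp hz
      rcases hmem with rfl | hz'
      · exact h2 _ _ (by simpa using hb)
      · exact hp.1 z hz'

lemma pairwise_foldl_insertBy {α : Type} (before : α → α → Bool) (Q : α → α → Prop)
    (htrans : ∀ a b c, Q a b → Q b c → Q a c)
    (h1 : ∀ a b, before a b = true → Q a b)
    (h2 : ∀ a b, before a b = false → Q b a) :
    ∀ (xs acc : List α), acc.Pairwise Q →
      (xs.foldl (fun acc x => PySem.List.insertBy before x acc) acc).Pairwise Q := by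
  intro xs
  induction xs with
  | nil => intro acc h; simpa using h
  | cons x xs ih =>
    intro acc h
    exact ih _ (pairwise_insertBy before Q htrans h1 h2 x acc h)

-- the first components of sorted2 … (·.1) (·.2) are nondecreasing
lemma sorted2_pairwise_fst (xs : List (Int × Int)) :
    (PySem.List.sorted2 xs (fun p => p.1) (fun p => p.2)).Pairwise
      (fun p q => p.1 ≤ q.1) := by
  have hdef : PySem.List.sorted2 xs (fun p => p.1) (fun p => p.2)
      = xs.foldl (fun acc x => PySem.List.insertBy
          (fun a b => decide (a.1 < b.1) || (!decide (b.1 < a.1) && decide (a.2 < b.2)))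
          x acc) [] := rfl
  rw [hdef]
  apply pairwise_foldl_insertBy
  · intro a b c h1 h2; omega
  · intro a b h
    simp at h
    rcases h with h | ⟨h, _⟩ <;> omega
  · intro a b h
    simp at h
    have := h.1; omega
  · exact List.Pairwise.nil

-- B's penalty multiset, sorted, is the image under pvC of A's sorted pair list
lemma sorted_penalties_eq (P : List (Int × Int)) :
    PySem.List.sorted (P.map pvMn) (fun x => x)
      = (PySem.List.sorted2 (P.map pvG) (fun p => p.1) (fun p => p.2)).map pvC := by
  apply PySem.List.eq_of_perm_of_pairwise_le_of_injective (fun x : Int => x)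
    (fun a b h => h)
  · -- permutation
    refine (PySem.List.sorted_perm _ _ _).trans ?_
    refine List.Perm.trans ?_ ((PySem.List.sorted2_perm (P.map pvG) _ _ false).map pvC).symm
    rw [List.map_map]
    apply List.Perm.of_eq
    apply List.map_congr_left
    intro p _
    simp only [Function.comp_apply, pvMn, pvC, pvG]
    split_ifs <;> omega
  · exact PySem.List.sorted_pairwise _ _
  · rw [List.pairwise_map]
    refine (sorted2_pairwise_fst (P.map pvG)).imp ?_
    intro p q h
    simp only [pvC]
    split_ifs <;> omega

-- quickselect characterisation: topkSum xs k is the sum of the last k elements of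
-- any nondecreasing rearrangement of xs (0 ≤ k ≤ |xs|; k ≤ 0 gives 0)
lemma topkSum_spec (n : Nat) : ∀ (xs : List Int), xs.length ≤ n →
    ∀ (k : Int), k ≤ (xs.length : Int) →
    ∀ (s : List Int), s.Perm xs → s.Pairwise (fun a b : Int => a ≤ b) →
    topkSum xs k = (s.reverse.take k.toNat).sum := by
  induction n with
  | zero =>
    intro xs hlen k hk s hperm _
    have hxs : xs = [] := List.eq_nil_of_length_eq_zero (by omega)
    subst hxs
    have hs : s = [] := List.Perm.eq_nil hperm
    subst hs
    rw [topkSum]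
    simp at hk ⊢
    omega
  | succ n ih =>
    intro xs hlen k hk s hperm hsort
    by_cases hk0 : k ≤ 0
    · rw [topkSum]
      rw [if_pos hk0]
      have : k.toNat = 0 := by omega
      simp [this]
    · push_neg at hk0
      have hxsne : xs ≠ [] := by
        intro h; subst h; simp at hk; omega
      have hlpos : 0 < xs.length := List.length_pos_of_ne_nil hxsne
      -- the pivot lookup succeeds
      have hidx : PySem.Int.floordiv (xs.length : Int) 2 = ((xs.length / 2 : Nat) : Int) := by
        exact_mod_cast PySem.Int.floordiv_natCast xs.length 2
      have hlt : xs.length / 2 < xs.length := Nat.div_lt_self hlpos (by omega)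
      have hget : PySem.List.pyGet? xs (PySem.Int.floordiv (xs.length : Int) 2)
          = some xs[xs.length / 2] := by
        rw [hidx, PySem.List.pyGet?_natCast]
        simp [hlt]
      set p := xs[xs.length / 2] with hpdef
      have hpmem : p ∈ xs := List.getElem_mem hlt
      -- the three parts
      set hi := xs.filter (fun x => decide (p < x)) with hhi
      set eqp := xs.filter (fun x => decide (x = p)) with heqp
      set lo := xs.filter (fun x => decide (x < p)) with hlo
      have hhi_mem : ∀ x ∈ hi, p < x := by
        intro x hx; have := List.of_mem_filter hx; simpa using this
      have heq_mem : ∀ x ∈ eqp, x = p := by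
        intro x hx; have := List.of_mem_filter hx; simpa using this
      have hlo_mem : ∀ x ∈ lo, x < p := by
        intro x hx; have := List.of_mem_filter hx; simpa using this
      -- xs ~ lo ++ eqp ++ hi
      have hperm3 : xs.Perm (lo ++ eqp ++ hi) := by
        rw [List.perm_iff_count]
        intro a
        rw [List.count_append, List.count_append]
        have clo : List.count a lo = if a < p then List.count a xs else 0 := by
          split_ifs with h
          · rw [hlo, List.count_filter (by simp [h])]
          · rw [List.count_eq_zero]
            intro hmem
            exact h (hlo_mem a hmem)
        have ceq : List.count a eqp = if a = p then List.count a xs else 0 := by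
          split_ifs with h
          · rw [heqp, List.count_filter (by simp [h])]
          · rw [List.count_eq_zero]
            intro hmem
            exact h (heq_mem a hmem)
        have chi : List.count a hi = if p < a then List.count a xs else 0 := by
          split_ifs with h
          · rw [hhi, List.count_filter (by simp [h])]
          · rw [List.count_eq_zero]
            intro hmem
            exact h (hhi_mem a hmem)
        rw [clo, ceq, chi]
        rcases lt_trichotomy a p with h | h | h
        · rw [if_pos h, if_neg (by omega), if_neg (by omega)]
          omega
        · rw [if_neg (by omega), if_pos h, if_neg (by omega)]
          omega
        · rw [if_neg (by omega), if_neg (by omega), if_pos h]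
          omega
      -- eqp is nonempty, so hi and lo are strictly shorter than xs
      have heq_ne : eqp ≠ [] := by
        have : p ∈ eqp := List.mem_filter.mpr ⟨hpmem, by simp⟩
        intro h; rw [h] at this; simp at this
      have hhi_lt : hi.length < xs.length := by
        rw [hhi, List.length_filter_lt_length_iff_exists]
        exact ⟨p, hpmem, by simp⟩
      have hlo_lt : lo.length < xs.length := by
        rw [hlo, List.length_filter_lt_length_iff_exists]
        exact ⟨p, hpmem, by simp⟩
      have hlen3 : xs.length = lo.length + eqp.length + hi.length := by
        have := hperm3.length_eq
        simp [List.length_append] at this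
        omega
      -- the sorted rearrangement decomposes as sLo ++ eqp ++ sHi
      set sLo := PySem.List.sorted lo (fun x : Int => x) with hsLo
      set sHi := PySem.List.sorted hi (fun x : Int => x) with hsHi
      have hsLo_perm : sLo.Perm lo := PySem.List.sorted_perm _ _ _
      have hsHi_perm : sHi.Perm hi := PySem.List.sorted_perm _ _ _
      have hsLo_pw : sLo.Pairwise (fun a b : Int => a ≤ b) := PySem.List.sorted_pairwise _ _
      have hsHi_pw : sHi.Pairwise (fun a b : Int => a ≤ b) := PySem.List.sorted_pairwise _ _
      have hs_eq : s = sLo ++ eqp ++ sHi := by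
        apply List.Perm.eq_of_pairwise (le := fun a b : Int => a ≤ b)
          (fun a b _ _ hab hba => le_antisymm hab hba)
          hsort
          (l₂ := sLo ++ eqp ++ sHi) ?_
          (hperm.trans (hperm3.trans
            (List.Perm.append (List.Perm.append hsLo_perm.symm (List.Perm.refl _)) hsHi_perm.symm)))
        · rw [List.append_assoc]
          rw [List.pairwise_append]
          refine ⟨hsLo_pw, ?_, ?_⟩
          · rw [List.pairwise_append]
            refine ⟨?_, hsHi_pw, ?_⟩
            · apply List.pairwise_of_forall_mem_list
              intro a ha b hb
              rw [heq_mem a ha, heq_mem b hb]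
            · intro a ha b hb
              rw [heq_mem a ha]
              exact le_of_lt (hhi_mem b (hsHi_perm.mem_iff.mp hb))
          · intro a ha b hb
            have ha' : a < p := hlo_mem a (hsLo_perm.mem_iff.mp ha)
            rcases List.mem_append.mp hb with hb | hb
            · rw [heq_mem b hb]; omega
            · have := hhi_mem b (hsHi_perm.mem_iff.mp hb); omega
      have hsLo_len : sLo.length = lo.length := hsLo_perm.length_eq
      have hsHi_len : sHi.length = hi.length := hsHi_perm.length_eq
      have hsHi_sum : sHi.sum = hi.sum := hsHi_perm.sum_eq
      -- unfold one step of topkSum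
      rw [topkSum]
      rw [if_neg (by omega), hget]
      simp only []
      rw [hs_eq]
      rw [List.reverse_append, List.reverse_append]
      by_cases hb1 : k ≤ (hi.length : Int)
      · -- recurse into hi
        rw [if_pos hb1]
        have := ih hi (by omega) k (by omega) sHi hsHi_perm hsHi_pw
        rw [this]
        rw [List.take_append_of_le_length (by simp [hsHi_len]; omega)]
      · rw [if_neg hb1]
        push_neg at hb1
        have htake1 : ∀ (rest : List Int),
            (sHi.reverse ++ rest).take k.toNat = sHi.reverse ++ rest.take (k.toNat - sHi.length) := by
          intro rest
          rw [List.take_append]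
          rw [List.take_of_length_le (by simp [hsHi_len]; omega)]
          simp
        by_cases hb2 : k ≤ (hi.length : Int) + (eqp.length : Int)
        · -- stop inside the pivot block
          rw [if_pos hb2]
          rw [htake1]
          rw [List.take_append_of_le_length (by simp [hsHi_len]; omega)]
          rw [List.sum_append, List.sum_reverse, hsHi_sum]
          have hrep : eqp = List.replicate eqp.length p := List.eq_replicate_of_mem heq_mem
          have htk : (eqp.reverse.take (k.toNat - sHi.length)).sum
              = ((k.toNat - sHi.length : Nat) : Int) * p := by
            rw [hrep]
            rw [List.reverse_replicate, List.take_replicate]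
            rw [List.sum_replicate]
            have hmin : min (k.toNat - sHi.length) eqp.length = k.toNat - sHi.length := by
              simp [hsHi_len]; omega
            rw [hmin]
            simp [nsmul_eq_mul]
          rw [htk]
          have : ((k.toNat - sHi.length : Nat) : Int) = k - (hi.length : Int) := by
            rw [hsHi_len]; omega
          rw [this]
        · -- recurse into lo
          rw [if_neg hb2]
          push_neg at hb2
          have hk' : k - (hi.length : Int) - (eqp.length : Int) ≤ (lo.length : Int) := by
            omega
          have hrec := ih lo (by omega) (k - (hi.length : Int) - (eqp.length : Int)) hk'
            sLo hsLo_perm hsLo_pw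
          rw [hrec]
          rw [htake1, List.take_append]
          have hle : eqp.reverse.length ≤ k.toNat - sHi.length := by
            simp [hsHi_len]; omega
          rw [List.take_of_length_le hle]
          rw [List.sum_append, List.sum_append, List.sum_reverse, List.sum_reverse, hsHi_sum]
          have hnt : (k - (hi.length : Int) - (eqp.length : Int)).toNat
              = k.toNat - sHi.length - eqp.reverse.length := by
            simp only [List.length_reverse, hsHi_len]; omega
          rw [hnt, ← hhi, ← heqp]
          ring

-- ===== VERDICT (by name: the statement is the Claim_ definition above) =====
theorem maxPoints1_spec : Claim_equal_maxPoints1 := by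
  intro t1 t2 k _ hpre
  obtain ⟨hlen, hk⟩ := hpre
  unfold Spec_maxPoints1 maxPoints1 maxPoints1_alt
  simp only []
  -- name the shared data
  rw [PySem.List.foldl_append_singleton_eq_map
    (fun i => (PySem.List.pyGetD t1 i 0 - PySem.List.pyGetD t2 i 0, PySem.List.pyGetD t2 i 0))]
  rw [List.nil_append, build_eq t1 t2 hlen]
  set P := t1.zip t2 with hP
  have hmapMx : (P.map fun ab => if ab.1 ≥ ab.2 then ab.1 else ab.2) = P.map pvMx := rfl
  have hmapMn : (P.map fun ab => if ab.1 < ab.2 then ab.1 - ab.2 else 0) = P.map pvMn := rfl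
  rw [hmapMx, hmapMn]
  set s := PySem.List.sorted2 (P.map pvG) (fun p => p.1) (fun p => p.2) with hs
  -- lengths
  have hPlen : P.length = t1.length := by
    rw [hP, List.length_zip]; omega
  have hslen : s.length = t1.length := by
    rw [hs, (PySem.List.sorted2_perm _ _ _ _).length_eq, List.length_map, hPlen]
  have hkn : k.toNat ≤ s.length := by
    rw [hslen]; omega
  -- evaluate A
  rw [aPopK_spec k.toNat s 0 hkn]
  dsimp only
  rw [aDrain_spec]
  -- evaluate B: topkSum over the penalties is the top-k sum of the sorted penalties
  have hpens_len : (P.map pvMn).length = t1.length := by rw [List.length_map, hPlen]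
  have htop : topkSum (P.map pvMn) k
      = ((((PySem.List.sorted (P.map pvMn) (fun x => x)).reverse).take k.toNat).sum) := by
    apply topkSum_spec (P.map pvMn).length (P.map pvMn) le_rfl k (by rw [hpens_len]; exact hk)
    · exact PySem.List.sorted_perm _ _ _
    · exact PySem.List.sorted_pairwise _ _
  rw [htop, sorted_penalties_eq P, ← hs]
  -- algebra over the sorted list s
  rw [← List.map_reverse, ← List.map_take]
  have hsplit : ((s.reverse.take k.toNat).map (fun p : Int × Int => p.1 + p.2)).sum
      = ((s.reverse.take k.toNat).map pvM).sum + ((s.reverse.take k.toNat).map pvC).sum := by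
    rw [← PySem.List.sum_map_add_int]
    apply congrArg
    apply List.map_congr_left
    intro p _
    simp only [pvM, pvC]
    split_ifs <;> ring
  have hM : ((s.reverse.take k.toNat).map pvM).sum + ((s.reverse.drop k.toNat).reverse.map pvM).sum
      = (P.map pvMx).sum := by
    rw [← List.sum_reverse ((s.reverse.drop k.toNat).reverse.map pvM), List.map_reverse,
      List.reverse_reverse]
    rw [← List.sum_append, ← List.map_append, List.take_append_drop]
    have h1 : (s.reverse.map pvM).sum = (s.map pvM).sum := by
      rw [List.map_reverse, List.sum_reverse]
    rw [h1]
    have h2 : (s.map pvM).Perm ((P.map pvG).map pvM) :=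
      (PySem.List.sorted2_perm (P.map pvG) _ _ false).map pvM
    rw [h2.sum_eq, List.map_map]
    apply congrArg
    apply List.map_congr_left
    intro p _
    simp only [Function.comp_apply, pvM, pvMx, pvG]
    split_ifs <;> omega
  rw [hsplit]
  omega
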